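-- pv_equiv track=rewrite | github.com/nnzhaocs/scripts-for-alltest | scripts/spark-code/get_file_type.py | filter_java
-- ===== SOURCE A (Python) =====
-- def filter_java(words):
--     lowcase_words = []
--     for word in words:
--         lowcase_words.append(word.lower())
--
--     if 'java' in lowcase_words and 'keystore' in lowcase_words:
--         return 'java-keystore', True
--     elif 'java' in lowcase_words and 'serialization' in lowcase_words:
--         return 'java-serialization', True
--     else:
--         return None, False
-- ===== SOURCE B (Python) =====
-- def filter_java(words):
--     has_java = has_keystore = has_serialization = False
--     for word in words:
--         w = word.lower()
--         if w == 'java':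
--             has_java = True
--         elif w == 'keystore':
--             has_keystore = True
--         elif w == 'serialization':
--             has_serialization = True
--     if has_java and has_keystore:
--         return 'java-keystore', True
--     if has_java and has_serialization:
--         return 'java-serialization', True
--     return None, False
-- ===== Notes on version B (the rewrite author's own statement) =====
-- stated objective: simpler
-- what changed: Replaces building a lowered copy of the list and four membership scans with a single pass that sets three boolean flags, then decides the result from the flags.
import Mathlib
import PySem

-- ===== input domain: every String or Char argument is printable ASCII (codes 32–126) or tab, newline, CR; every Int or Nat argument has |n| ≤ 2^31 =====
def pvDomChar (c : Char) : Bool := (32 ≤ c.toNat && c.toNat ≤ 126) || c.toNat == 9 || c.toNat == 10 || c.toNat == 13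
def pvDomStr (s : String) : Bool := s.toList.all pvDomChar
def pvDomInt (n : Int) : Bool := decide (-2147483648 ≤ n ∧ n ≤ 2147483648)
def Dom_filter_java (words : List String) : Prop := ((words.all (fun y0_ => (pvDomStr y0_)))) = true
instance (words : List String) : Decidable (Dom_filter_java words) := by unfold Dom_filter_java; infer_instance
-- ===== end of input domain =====

-- B replaces A's lowered-copy list and four membership scans by one pass setting three boolean flags (simpler, O(1) extra space).


-- ===== PORT A =====
def filter_java (words : List String) : Option String × Bool :=
  let lowcase_words := words.foldl (fun acc word => acc ++ [PySem.Str.lower word]) []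
  if lowcase_words.contains "java" && lowcase_words.contains "keystore" then
    (some "java-keystore", true)
  else if lowcase_words.contains "java" && lowcase_words.contains "serialization" then
    (some "java-serialization", true)
  else
    (none, false)

-- ===== PORT B =====
def filter_java_alt (words : List String) : Option String × Bool :=
  let flags := words.foldl (fun (st : Bool × Bool × Bool) word =>
    let w := PySem.Str.lower word
    if w == "java" then (true, st.2.1, st.2.2)
    else if w == "keystore" then (st.1, true, st.2.2)
    else if w == "serialization" then (st.1, st.2.1, true)
    else st) (false, false, false)
  if flags.1 && flags.2.1 then (some "java-keystore", true)
  else if flags.1 && flags.2.2 then (some "java-serialization", true)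
  else (none, false)

-- ===== PRECONDITION & SPEC =====
def Spec_filter_java (words : List String) (out : Option String × Bool) : Prop := out = filter_java_alt words
instance (words : List String) (out : Option String × Bool) : Decidable (Spec_filter_java words out) := by unfold Spec_filter_java; infer_instance

-- ===== CLAIM (what is proved, stated in full; the proofs are below) =====
def Claim_equal_filter_java : Prop := ∀ (words : List String), Dom_filter_java words → Spec_filter_java words (filter_java words)

-- ===== LEMMAS AND PROOFS =====

theorem fj_foldA (words : List String) (acc : List String) :
    words.foldl (fun acc word => acc ++ [PySem.Str.lower word]) acc
      = acc ++ words.map PySem.Str.lower := by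
  induction words generalizing acc with
  | nil => simp
  | cons w ws ih => simp [List.foldl, ih]

theorem fj_foldB (words : List String) (st : Bool × Bool × Bool) :
    words.foldl (fun (st : Bool × Bool × Bool) word =>
      let w := PySem.Str.lower word
      if w == "java" then (true, st.2.1, st.2.2)
      else if w == "keystore" then (st.1, true, st.2.2)
      else if w == "serialization" then (st.1, st.2.1, true)
      else st) st
    = (st.1 || (words.map PySem.Str.lower).contains "java",
       st.2.1 || (words.map PySem.Str.lower).contains "keystore",
       st.2.2 || (words.map PySem.Str.lower).contains "serialization") := by
  induction words generalizing st with
  | nil => simp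
  | cons w ws ih =>
    simp only [List.foldl, List.map, List.contains_cons]
    rw [ih]
    by_cases h1 : PySem.Str.lower w = "java"
    · simp [h1, eq_comm]
    · by_cases h2 : PySem.Str.lower w = "keystore"
      · simp [h2, eq_comm]
      · by_cases h3 : PySem.Str.lower w = "serialization"
        · simp [h3, eq_comm]
        · have g1 : ("java" == PySem.Str.lower w) = false := by simp [Ne.symm h1]
          have g2 : ("keystore" == PySem.Str.lower w) = false := by simp [Ne.symm h2]
          have g3 : ("serialization" == PySem.Str.lower w) = false := by simp [Ne.symm h3]
          simp [h1, h2, h3, g1, g2, g3]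

-- ===== VERDICT (by name: the statement is the Claim_ definition above) =====
theorem filter_java_spec : Claim_equal_filter_java := by
  intro words _
  unfold Spec_filter_java filter_java filter_java_alt
  rw [fj_foldA, fj_foldB]
  simp
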